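-- pv_equiv track=rewrite | github.com/BDB-Labs/aira-research | scripts/arm_b_extract.py | serialize_counter_by_band
-- ===== SOURCE A (Python) =====
-- from collections import Counter
--
-- SEARCH_LANGUAGES = ("javascript", "python", "typescript")
--
-- SIZE_BANDS = ("100_299", "300_999", "1000_plus")
--
-- def aggregate_counter_by_band(counter: Counter[tuple[str, str, int]]) -> Counter[tuple[str, str]]:
--     aggregated: Counter[tuple[str, str]] = Counter()
--     for (language, band, _decile), count in counter.items():
--         aggregated[(language, band)] += count
--     return aggregated
--
-- def serialize_counter_by_band(counter: Counter[tuple[str, str, int]]) -> dict[str, int]: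
--     aggregated = aggregate_counter_by_band(counter)
--     return {
--         f"{language}:{band}": aggregated[(language, band)]
--         for language in SEARCH_LANGUAGES
--         for band in SIZE_BANDS
--         if aggregated.get((language, band), 0)
--     }
-- ===== SOURCE B (Python) =====
-- SEARCH_LANGUAGES = ("javascript", "python", "typescript")
--
-- SIZE_BANDS = ("100_299", "300_999", "1000_plus")
--
--
-- def serialize_counter_by_band(counter):
--     result = {}
--     for language in SEARCH_LANGUAGES:
--         for band in SIZE_BANDS:
--             total = sum(count for (lang, b, _decile), count in counter.items()
--                         if lang == language and b == band)
--             if total: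
--                 result[f"{language}:{band}"] = total
--     return result
-- ===== Notes on version B (the rewrite author's own statement) =====
-- stated objective: alternative
-- what changed: B builds no aggregation dict at all: for each of the 9 fixed (language, band) combos in product order it sums the matching counts by a direct scan of counter.items(), replacing A's Counter-aggregation pass followed by per-combo lookups.
import Mathlib
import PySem

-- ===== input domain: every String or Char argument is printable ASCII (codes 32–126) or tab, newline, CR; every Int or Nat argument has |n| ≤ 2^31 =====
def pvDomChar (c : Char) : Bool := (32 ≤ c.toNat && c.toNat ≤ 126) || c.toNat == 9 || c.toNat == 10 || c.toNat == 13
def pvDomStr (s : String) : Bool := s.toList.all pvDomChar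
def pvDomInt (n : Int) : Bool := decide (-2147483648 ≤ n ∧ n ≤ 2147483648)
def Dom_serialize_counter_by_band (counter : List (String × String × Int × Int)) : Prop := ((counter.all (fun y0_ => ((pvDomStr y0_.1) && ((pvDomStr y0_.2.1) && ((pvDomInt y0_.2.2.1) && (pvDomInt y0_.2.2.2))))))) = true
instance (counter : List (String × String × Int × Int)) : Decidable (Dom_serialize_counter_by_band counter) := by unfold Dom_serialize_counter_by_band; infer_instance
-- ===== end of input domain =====

-- B drops the aggregation dict entirely: each of the 9 fixed (language, band) combos is
-- totalled by a direct scan of the counter items (objective: alternative, same result).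


-- ===== PORT A =====
def SEARCH_LANGUAGES : List String := ["javascript", "python", "typescript"]

def SIZE_BANDS : List String := ["100_299", "300_999", "1000_plus"]

-- Counter 'aggregated[(language, band)] += count' over counter.items()
def aggregate_counter_by_band (counter : List (String × String × Int × Int)) :
    PySem.Dict (String × String) Int :=
  counter.foldl (fun d e => d.modify (e.1, e.2.1) 0 (· + e.2.2.2)) PySem.Dict.empty

-- The dict-comprehension keys f"{language}:{band}" are pairwise distinct, so the result
-- dict in insertion order is exactly the generated association list.
def serialize_counter_by_band (counter : List (String × String × Int × Int)) : List (String × Int) :=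
  let aggregated := aggregate_counter_by_band counter
  (SEARCH_LANGUAGES.flatMap (fun language => SIZE_BANDS.map (fun band => (language, band)))).foldl
    (fun acc c =>
      if aggregated.getD c 0 != 0 then acc ++ [(c.1 ++ ":" ++ c.2, aggregated.getD c 0)] else acc) []

-- ===== PORT B =====
-- result-dict keys f"{language}:{band}" are distinct, so the dict is the built association list
def serialize_counter_by_band_alt (counter : List (String × String × Int × Int)) : List (String × Int) :=
  SEARCH_LANGUAGES.foldl (fun result language =>
    SIZE_BANDS.foldl (fun result band =>
      -- total = sum(count for (lang, b, _decile), count in counter.items() if lang == language and b == band)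
      let total := counter.foldl (fun s e =>
        if e.1 = language ∧ e.2.1 = band then s + e.2.2.2 else s) 0
      if total != 0 then result ++ [(language ++ ":" ++ band, total)] else result) result) []

-- ===== PRECONDITION & SPEC =====
def Spec_serialize_counter_by_band (counter : List (String × String × Int × Int)) (out : List (String × Int)) : Prop := out = serialize_counter_by_band_alt counter
instance (counter : List (String × String × Int × Int)) (out : List (String × Int)) : Decidable (Spec_serialize_counter_by_band counter out) := by unfold Spec_serialize_counter_by_band; infer_instance

-- ===== CLAIM (what is proved, stated in full; the proofs are below) =====
def Claim_equal_serialize_counter_by_band : Prop := ∀ (counter : List (String × String × Int × Int)), Dom_serialize_counter_by_band counter → Spec_serialize_counter_by_band counter (serialize_counter_by_band counter)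

-- ===== LEMMAS AND PROOFS =====

-- total count contributed to combo c by the entries of l
def pvTot (c : String × String) : List (String × String × Int × Int) → Int
  | [] => 0
  | e :: l => (if (e.1, e.2.1) = c then e.2.2.2 else 0) + pvTot c l

lemma pvAgg_getD (l : List (String × String × Int × Int))
    (d : PySem.Dict (String × String) Int) (c : String × String) :
    (l.foldl (fun d e => d.modify (e.1, e.2.1) 0 (· + e.2.2.2)) d).getD c 0
      = d.getD c 0 + pvTot c l := by
  induction l generalizing d with
  | nil => simp [pvTot]
  | cons e l ih =>
    simp only [List.foldl_cons, ih, pvTot, PySem.Dict.getD_modify]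
    by_cases h : c = (e.1, e.2.1)
    · simp [h]; ring
    · have h' : ¬ (e.1, e.2.1) = c := fun hh => h hh.symm
      simp [h, h']

lemma pvSum_eq_pvTot (l : List (String × String × Int × Int)) (lang band : String) (s : Int) :
    l.foldl (fun s e => if e.1 = lang ∧ e.2.1 = band then s + e.2.2.2 else s) s
      = s + pvTot (lang, band) l := by
  induction l generalizing s with
  | nil => simp [pvTot]
  | cons e l ih =>
    simp only [List.foldl_cons, ih, pvTot, Prod.mk.injEq]
    by_cases h1 : e.1 = lang <;> by_cases h2 : e.2.1 = band <;> simp [h1, h2] <;> try ring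

-- ===== VERDICT (by name: the statement is the Claim_ definition above) =====
theorem serialize_counter_by_band_spec : Claim_equal_serialize_counter_by_band := by
  intro counter _
  unfold Spec_serialize_counter_by_band serialize_counter_by_band serialize_counter_by_band_alt
  simp only []
  -- canonical step over a combo
  have hA : ∀ c : String × String,
      (aggregate_counter_by_band counter).getD c 0 = pvTot c counter := by
    intro c; unfold aggregate_counter_by_band; rw [pvAgg_getD]; simp
  -- rewrite A's fold into the canonical step, then reshape flatMap/map folds into B's nested folds
  rw [List.foldl_flatMap]
  refine List.foldl_ext _ _ _ (fun result language _ => ?_)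
  rw [List.foldl_map]
  refine List.foldl_ext _ _ _ (fun result band _ => ?_)
  rw [hA (language, band), pvSum_eq_pvTot, zero_add]
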